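-- pv_equiv track=rewrite | github.com/AIandSocialGoodLab/learningplan | MDP_Model/optimal_solver.py | gen_all_valid_states
-- ===== SOURCE A (Python) =====
-- import csv, copy, mdptoolbox, json
--
-- def gen_all_valid_states(s):
-- 	res = []
-- 	not_exact = False
-- 	for i in range(len(s)):
-- 		if s[i] < 0:
-- 			not_exact = True
-- 			for j in range(5):
-- 				cur_s = copy.deepcopy(s)
-- 				cur_s[i] = j
-- 				res += gen_all_valid_states(cur_s)
--
-- 			break
-- 	if not_exact:
-- 		return res
-- 	else:
-- 		return [s]
-- ===== SOURCE B (Python) =====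
-- def gen_all_valid_states(s):
--     results = [s]
--     for i in range(len(s)):
--         if s[i] < 0:
--             results = [state[:i] + [j] + state[i+1:]
--                        for state in results for j in range(5)]
--     return results
-- ===== Notes on version B (the rewrite author's own statement) =====
-- stated objective: alternative
-- what changed: Replaces A's recursion (find first negative slot, deepcopy, recurse on the modified state) with a single iterative left-to-right worklist pass that expands each negative slot across the current result list.
import Mathlib
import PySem

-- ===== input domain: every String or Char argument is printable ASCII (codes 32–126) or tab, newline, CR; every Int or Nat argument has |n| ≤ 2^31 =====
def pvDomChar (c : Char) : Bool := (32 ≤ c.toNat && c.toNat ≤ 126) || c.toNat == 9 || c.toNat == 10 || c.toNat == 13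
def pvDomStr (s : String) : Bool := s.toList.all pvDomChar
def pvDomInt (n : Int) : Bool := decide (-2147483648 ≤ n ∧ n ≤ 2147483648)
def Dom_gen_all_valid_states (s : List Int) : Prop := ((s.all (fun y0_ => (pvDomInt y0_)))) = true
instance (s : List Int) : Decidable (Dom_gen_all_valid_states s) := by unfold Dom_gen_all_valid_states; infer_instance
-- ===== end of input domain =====

-- B replaces A's deepcopy-and-recurse expansion with a single left-to-right worklist pass
-- (objective: alternative decomposition; no speed claim beyond what a timing run reports).

-- ===== PORT A =====
-- A recurses on the state with the first negative slot replaced; the recursion is made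
-- total with a fuel argument bounded by the number of negative slots (a pure totality
-- guard: fuel = countP(<0)+1 always suffices, the 0 branch is never reached).
def genAllValidStatesFuel : Nat → List Int → List (List Int)
  | 0, s => [s]
  | fuel + 1, s =>
    -- 'for i in range(len(s)): if s[i] < 0: … break' = index of the first negative slot
    match s.findIdx? (fun x => decide (x < 0)) with
    | none => [s]
    | some i =>
      -- res = []; for j in range(5): cur_s = deepcopy(s); cur_s[i] = j; res += rec(cur_s)
      (List.range 5).foldl
        (fun res (j : Nat) => res ++ genAllValidStatesFuel fuel (s.set i (j : Int))) []

def gen_all_valid_states (s : List Int) : List (List Int) :=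
  genAllValidStatesFuel (s.countP (fun x => decide (x < 0)) + 1) s

-- ===== PORT B =====
-- results = [s]; for i in range(len(s)): if s[i] < 0:
--     results = [state[:i] + [j] + state[i+1:] for state in results for j in range(5)]
-- s[i] with 0 ≤ i < len(s) is exactly List.getD i 0; the slices state[:i], state[i+1:]
-- with 0 ≤ i are exactly take/drop.
def gen_all_valid_states_alt (s : List Int) : List (List Int) :=
  (List.range s.length).foldl
    (fun results i =>
      if s.getD i 0 < 0 then
        results.flatMap (fun state =>
          (List.range 5).map (fun (j : Nat) => state.take i ++ (j : Int) :: state.drop (i + 1)))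
      else results)
    [s]

-- ===== PRECONDITION & SPEC =====
def Spec_gen_all_valid_states (s : List Int) (out : List (List Int)) : Prop := out = gen_all_valid_states_alt s
instance (s : List Int) (out : List (List Int)) : Decidable (Spec_gen_all_valid_states s out) := by unfold Spec_gen_all_valid_states; infer_instance

-- ===== CLAIM (what is proved, stated in full; the proofs are below) =====
def Claim_equal_gen_all_valid_states : Prop := ∀ (s : List Int), Dom_gen_all_valid_states s → Spec_gen_all_valid_states s (gen_all_valid_states s)

-- ===== LEMMAS AND PROOFS =====

-- abbreviation for B's loop body (proof-only helper)
def pvStep (s : List Int) (results : List (List Int)) (i : Nat) : List (List Int) :=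
  if s.getD i 0 < 0 then
    results.flatMap (fun state =>
      (List.range 5).map (fun (j : Nat) => state.take i ++ (j : Int) :: state.drop (i + 1)))
  else results

theorem alt_eq_foldl_pvStep (s : List Int) :
    gen_all_valid_states_alt s = (List.range s.length).foldl (pvStep s) [s] := rfl

-- B's step distributes over ++ of the worklist
theorem pvStep_append (s : List Int) (r₁ r₂ : List (List Int)) (i : Nat) :
    pvStep s (r₁ ++ r₂) i = pvStep s r₁ i ++ pvStep s r₂ i := by
  unfold pvStep; split <;> simp

theorem foldl_pvStep_append (s : List Int) (idxs : List Nat) (r₁ r₂ : List (List Int)) :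
    idxs.foldl (pvStep s) (r₁ ++ r₂) =
      idxs.foldl (pvStep s) r₁ ++ idxs.foldl (pvStep s) r₂ := by
  induction idxs generalizing r₁ r₂ with
  | nil => rfl
  | cons i idxs ih => simp only [List.foldl_cons, pvStep_append, ih]

theorem foldl_pvStep_nil (s : List Int) (idxs : List Nat) :
    idxs.foldl (pvStep s) [] = [] := by
  induction idxs with
  | nil => rfl
  | cons i idxs ih => simpa [pvStep] using ih

theorem foldl_pvStep_flatMap (s : List Int) (idxs : List Nat) (l : List Nat)
    (f : Nat → List (List Int)) :
    idxs.foldl (pvStep s) (l.flatMap f) =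
      l.flatMap (fun x => idxs.foldl (pvStep s) (f x)) := by
  induction l with
  | nil => simpa using foldl_pvStep_nil s idxs
  | cons x l ih => simp only [List.flatMap_cons, foldl_pvStep_append, ih]

-- indices whose slot is non-negative are skipped
theorem foldl_pvStep_skip (s : List Int) (idxs : List Nat) (r : List (List Int))
    (h : ∀ k ∈ idxs, ¬ s.getD k 0 < 0) :
    idxs.foldl (pvStep s) r = r := by
  induction idxs generalizing r with
  | nil => rfl
  | cons i idxs ih =>
    have hi : ¬ s.getD i 0 < 0 := h i (by simp)
    simp only [List.foldl_cons, pvStep, if_neg hi]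
    exact ih r (fun k hk => h k (by simp [hk]))

-- the step only looks at s through getD on the visited index
theorem foldl_pvStep_congr (s s' : List Int) (idxs : List Nat) (r : List (List Int))
    (h : ∀ k ∈ idxs, s.getD k 0 = s'.getD k 0) :
    idxs.foldl (pvStep s) r = idxs.foldl (pvStep s') r := by
  induction idxs generalizing r with
  | nil => rfl
  | cons i idxs ih =>
    have hi : pvStep s r i = pvStep s' r i := by
      unfold pvStep; rw [h i (by simp)]
    simp only [List.foldl_cons, hi]
    exact ih _ (fun k hk => h k (by simp [hk]))

-- A's inner loop 'res += …' from res = [] is a flatMap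
theorem foldl_append_eq_flatMap' (l : List Nat) (f : Nat → List (List Int)) :
    l.foldl (fun res j => res ++ f j) [] = l.flatMap f := by
  suffices h : ∀ acc, l.foldl (fun res j => res ++ f j) acc = acc ++ l.flatMap f by
    simpa using h []
  induction l with
  | nil => simp
  | cons x l ih => intro acc; simp [ih, List.append_assoc]

-- key lemma: B on a state whose first negative slot is i expands slot i first
theorem alt_expand (s : List Int) (i : Nat)
    (hfind : s.findIdx? (fun x => decide (x < 0)) = some i) :
    gen_all_valid_states_alt s =
      (List.range 5).flatMap (fun (j : Nat) => gen_all_valid_states_alt (s.set i (j : Int))) := by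
  obtain ⟨hilen, hidx⟩ := List.findIdx?_eq_some_iff_findIdx_eq.mp hfind
  have hneg : s[i] < 0 := by
    have := @List.findIdx_getElem _ (fun x => decide (x < 0)) s (hidx ▸ hilen)
    simp only [decide_eq_true_eq] at this
    simpa [hidx] using (hidx ▸ this)
  have hbefore : ∀ k, (hk : k < i) → ¬ s[k]'(lt_trans hk hilen) < 0 := by
    intro k hk
    have := List.not_of_lt_findIdx (p := fun x => decide (x < 0)) (xs := s) (i := k)
      (by omega)
    simpa using this
  have hgetD : ∀ k, (hk : k < s.length) → s.getD k 0 = s[k] := fun k hk =>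
    List.getD_eq_getElem s 0 hk
  -- split range (length s) = range i ++ [i] ++ range' (i+1) (length s - (i+1))
  have hsplit : List.range s.length =
      (List.range i ++ [i]) ++ List.range' (i + 1) (s.length - (i + 1)) := by
    rw [List.range_eq_range']
    have h1 : List.range i ++ [i] = List.range' 0 (i + 1) := by
      rw [List.range_eq_range']
      have := @List.range'_append 0 i 1 1
      simpa using this
    rw [h1]
    have := @List.range'_append 0 (i + 1) (s.length - (i + 1)) 1
    simp only [one_mul, Nat.zero_add] at this
    rw [this]
    congr 1
    omega
  have hskip : ∀ (s' : List Int), (∀ k, (hk : k < i) → s'.getD k 0 = s.getD k 0) →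
      ∀ r, (List.range i).foldl (pvStep s') r = r := by
    intro s' hs' r
    apply foldl_pvStep_skip
    intro k hk
    have hk' : k < i := List.mem_range.mp hk
    have hkl : k < s.length := lt_trans hk' hilen
    rw [hs' k hk', hgetD k hkl]
    exact hbefore k hk'
  rw [alt_eq_foldl_pvStep, hsplit, List.foldl_append, List.foldl_append,
    hskip s (fun _ _ => rfl) [s]]
  -- index i: the expansion fires and produces the five substituted states
  have hstepi : [i].foldl (pvStep s) [s]
      = (List.range 5).flatMap (fun (j : Nat) => [s.set i (j : Int)]) := by
    simp only [List.foldl_cons, List.foldl_nil, pvStep, hgetD i hilen, if_pos hneg]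
    rw [← List.map_eq_flatMap, List.flatMap_singleton]
    apply List.map_congr_left
    intro j _
    rw [List.set_eq_take_append_cons_drop, if_pos hilen]
  rw [hstepi, foldl_pvStep_flatMap]
  -- compare with B run from scratch on s.set i j
  apply List.flatMap_congr
  intro j _
  rw [alt_eq_foldl_pvStep, List.length_set, hsplit, List.foldl_append, List.foldl_append]
  have hne : ∀ k, i ≠ k → (s.set i (j : Int)).getD k 0 = s.getD k 0 := by
    intro k hk
    rw [List.getD_eq_getElem?_getD, List.getD_eq_getElem?_getD, List.getElem?_set_ne hk]
  rw [hskip (s.set i (j : Int)) (fun k hk => hne k (by omega)) [s.set i (j : Int)]]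
  have hi' : [i].foldl (pvStep (s.set i (j : Int))) [s.set i (j : Int)]
      = [s.set i (j : Int)] := by
    simp only [List.foldl_cons, List.foldl_nil, pvStep]
    rw [if_neg]
    have hl : i < (s.set i (j : Int)).length := by simpa using hilen
    rw [List.getD_eq_getElem (s.set i (j : Int)) 0 hl, List.getElem_set_self]
    exact Int.not_lt.mpr (Int.natCast_nonneg j)
  rw [hi']
  apply foldl_pvStep_congr
  intro k hk
  have : i + 1 ≤ k := (List.mem_range'_1.mp hk).1
  exact (hne k (by omega)).symm

-- the fuel recursion (port of A) computes B, for any sufficient fuel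
theorem genFuel_eq_alt : ∀ (fuel : Nat) (s : List Int),
    s.countP (fun x => decide (x < 0)) < fuel →
    genAllValidStatesFuel fuel s = gen_all_valid_states_alt s := by
  intro fuel
  induction fuel with
  | zero => intro s h; omega
  | succ fuel ih =>
    intro s h
    cases hfind : s.findIdx? (fun x => decide (x < 0)) with
    | none =>
      -- no negative slot: B's loop never fires and returns [s]
      have hall := List.findIdx?_eq_none_iff.mp hfind
      rw [genAllValidStatesFuel, hfind, alt_eq_foldl_pvStep, foldl_pvStep_skip]
      intro k hk
      have hkl : k < s.length := List.mem_range.mp hk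
      rw [List.getD_eq_getElem s 0 hkl]
      have := hall s[k] (s.getElem_mem hkl)
      simpa using this
    | some i =>
      obtain ⟨hilen, hidx⟩ := List.findIdx?_eq_some_iff_findIdx_eq.mp hfind
      have hneg : s[i] < 0 := by
        have := @List.findIdx_getElem _ (fun x => decide (x < 0)) s (hidx ▸ hilen)
        simp only [decide_eq_true_eq] at this
        simpa [hidx] using (hidx ▸ this)
      rw [genAllValidStatesFuel, hfind]
      show (List.range 5).foldl
          (fun res (j : Nat) => res ++ genAllValidStatesFuel fuel (s.set i (j : Int))) []
        = gen_all_valid_states_alt s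
      rw [foldl_append_eq_flatMap', alt_expand s i hfind]
      apply List.flatMap_congr
      intro j _
      apply ih
      have hcount := List.countP_set (p := fun x => decide (x < 0)) (l := s)
        (i := i) (a := (j : Int)) hilen
      have hpos : 0 < s.countP (fun x => decide (x < 0)) :=
        List.countP_pos_iff.mpr ⟨s[i], s.getElem_mem hilen, by simpa using hneg⟩
      have hj : ¬ ((j : Int) < 0) := Int.not_lt.mpr (Int.natCast_nonneg j)
      rw [hcount]
      simp only [hneg, decide_true, if_pos, hj, decide_eq_true_eq, if_false]
      omega

-- ===== VERDICT (by name: the statement is the Claim_ definition above) =====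
theorem gen_all_valid_states_spec : Claim_equal_gen_all_valid_states := by
  intro s _
  unfold Spec_gen_all_valid_states gen_all_valid_states
  exact genFuel_eq_alt _ s (Nat.lt_succ_self _)
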